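-- pv_equiv track=rewrite | github.com/ThomasGorges/pasal | paper/source/utility/loader.py | calculate_db_indices
-- ===== SOURCE A (Python) =====
-- def calculate_db_indices(datasets, pyrfume_odors):
--     start_indices, end_indices = {}, {}
--
--     start_idx = 0
--     end_idx = start_idx
--
--     for db_name in datasets:
--         if db_name == 'dream_mean' or db_name == 'dream_std':
--             num_classes = 21
--         else:
--             num_classes = len(pyrfume_odors[db_name])
--
--         end_idx += num_classes
--
--         start_indices[db_name] = start_idx
--         end_indices[db_name] = end_idx
--
--         start_idx = end_idx
--
--     return start_indices, end_indices
-- ===== SOURCE B (Python) =====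
-- def calculate_db_indices(datasets, pyrfume_odors):
--     def size(db):
--         return 21 if db in ('dream_mean', 'dream_std') else len(pyrfume_odors[db])
--
--     def triples(remaining, offset):
--         if not remaining:
--             return []
--         db, *rest = remaining
--         n = size(db)
--         return [(db, offset, offset + n)] + triples(rest, offset + n)
--
--     ts = triples(datasets, 0)
--     return {db: s for db, s, _ in ts}, {db: e for db, _, e in ts}
-- ===== Notes on version B (the rewrite author's own statement) =====
-- stated objective: alternative
-- what changed: Replaces A's imperative loop that mutates two dicts and two running counters by a pure recursion on the dataset list producing (name, start, end) triples, from which the two dicts are assembled afterwards by comprehensions.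
import Mathlib
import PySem

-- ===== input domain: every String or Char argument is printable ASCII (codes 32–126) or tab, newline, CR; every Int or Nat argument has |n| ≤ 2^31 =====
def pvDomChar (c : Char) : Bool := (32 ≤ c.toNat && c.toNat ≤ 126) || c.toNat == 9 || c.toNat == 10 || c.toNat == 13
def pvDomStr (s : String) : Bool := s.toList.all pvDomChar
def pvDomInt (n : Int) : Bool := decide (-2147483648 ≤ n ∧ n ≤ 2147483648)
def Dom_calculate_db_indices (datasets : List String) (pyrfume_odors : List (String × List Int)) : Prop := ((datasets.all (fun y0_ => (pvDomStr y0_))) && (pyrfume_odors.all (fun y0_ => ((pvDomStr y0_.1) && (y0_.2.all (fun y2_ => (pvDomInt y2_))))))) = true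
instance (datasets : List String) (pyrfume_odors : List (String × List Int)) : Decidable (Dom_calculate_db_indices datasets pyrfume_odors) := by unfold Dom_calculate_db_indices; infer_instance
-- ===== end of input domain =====

-- B replaces A's imperative dict-mutating loop by a pure recursion producing (name, start, end) triples, then assembles the dicts; alternative decomposition, same cost.

-- ===== PORT A =====
-- single loop carrying (start_indices, end_indices, start_idx, end_idx)
def calculate_db_indices (datasets : List String) (pyrfume_odors : List (String × List Int)) : (List (String × Int)) × (List (String × Int)) :=
  let st := datasets.foldl
    (fun (st : PySem.Dict String Int × PySem.Dict String Int × Int × Int) db_name =>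
      let num_classes : Int :=
        if db_name == "dream_mean" || db_name == "dream_std" then 21
        else ((((PySem.Dict.mk pyrfume_odors).get? db_name).getD []).length : Int)
      let end_idx := st.2.2.2 + num_classes
      (st.1.insert db_name st.2.2.1, st.2.1.insert db_name end_idx, end_idx, end_idx))
    (PySem.Dict.empty, PySem.Dict.empty, 0, 0)
  (st.1.items, st.2.1.items)

-- ===== PORT B =====
-- size(db) helper of Source B
def pvAltSize (pyrfume_odors : List (String × List Int)) (db : String) : Int :=
  if db == "dream_mean" || db == "dream_std" then 21
  else ((((PySem.Dict.mk pyrfume_odors).get? db).getD []).length : Int)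

-- triples(remaining, offset) helper of Source B: pure recursion on the list
def pvAltTriples (pyrfume_odors : List (String × List Int)) (offset : Int) :
    List String → List (String × Int × Int)
  | [] => []
  | db :: rest =>
    let n := pvAltSize pyrfume_odors db
    (db, offset, offset + n) :: pvAltTriples pyrfume_odors (offset + n) rest

def calculate_db_indices_alt (datasets : List String) (pyrfume_odors : List (String × List Int)) : (List (String × Int)) × (List (String × Int)) :=
  let ts := pvAltTriples pyrfume_odors 0 datasets
  -- the two dict comprehensions
  let si := ts.foldl (fun (d : PySem.Dict String Int) t => d.insert t.1 t.2.1) PySem.Dict.empty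
  let ei := ts.foldl (fun (d : PySem.Dict String Int) t => d.insert t.1 t.2.2) PySem.Dict.empty
  (si.items, ei.items)

-- ===== PRECONDITION & SPEC =====
-- Pre_ excludes exactly the inputs where Python A raises KeyError: a dataset name other
-- than 'dream_mean'/'dream_std' that is not a key of pyrfume_odors.
def Pre_calculate_db_indices (datasets : List String) (pyrfume_odors : List (String × List Int)) : Prop :=
  (datasets.all (fun db =>
    db == "dream_mean" || db == "dream_std" || (pyrfume_odors.map (·.1)).contains db)) = true
instance (datasets : List String) (pyrfume_odors : List (String × List Int)) : Decidable (Pre_calculate_db_indices datasets pyrfume_odors) := by unfold Pre_calculate_db_indices; infer_instance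

def pvWitness_calculate_db_indices : List String × (List (String × List Int)) :=
  (["dream_mean", "musk"], [("musk", [1, 2, 3])])

def Spec_calculate_db_indices (datasets : List String) (pyrfume_odors : List (String × List Int)) (out : (List (String × Int)) × (List (String × Int))) : Prop := out = calculate_db_indices_alt datasets pyrfume_odors
instance (datasets : List String) (pyrfume_odors : List (String × List Int)) (out : (List (String × Int)) × (List (String × Int))) : Decidable (Spec_calculate_db_indices datasets pyrfume_odors out) := by unfold Spec_calculate_db_indices; infer_instance

-- ===== CLAIM (what is proved, stated in full; the proofs are below) =====
def Claim_equal_calculate_db_indices : Prop := ∀ (datasets : List String) (pyrfume_odors : List (String × List Int)), Dom_calculate_db_indices datasets pyrfume_odors → Pre_calculate_db_indices datasets pyrfume_odors → Spec_calculate_db_indices datasets pyrfume_odors (calculate_db_indices datasets pyrfume_odors)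

-- ===== LEMMAS AND PROOFS =====

-- A's loop, generalized: it produces the two insert-folds over B's triples list
theorem loopA_eq (po : List (String × List Int)) (ds : List String)
    (si ei : PySem.Dict String Int) (e : Int) :
    ds.foldl
      (fun (st : PySem.Dict String Int × PySem.Dict String Int × Int × Int) db_name =>
        let num_classes : Int :=
          if db_name == "dream_mean" || db_name == "dream_std" then 21
          else ((((PySem.Dict.mk po).get? db_name).getD []).length : Int)
        let end_idx := st.2.2.2 + num_classes
        (st.1.insert db_name st.2.2.1, st.2.1.insert db_name end_idx, end_idx, end_idx))
      (si, ei, e, e)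
    = ((pvAltTriples po e ds).foldl (fun d t => d.insert t.1 t.2.1) si,
       (pvAltTriples po e ds).foldl (fun d t => d.insert t.1 t.2.2) ei,
       e + (ds.map (pvAltSize po)).sum, e + (ds.map (pvAltSize po)).sum) := by
  induction ds generalizing si ei e with
  | nil => simp [pvAltTriples]
  | cons db rest ih =>
    simp only [List.foldl_cons, List.map_cons, List.sum_cons, pvAltTriples]
    rw [ih]
    simp [pvAltSize]
    ring_nf

theorem calc_eq (datasets : List String) (pyrfume_odors : List (String × List Int)) :
    calculate_db_indices datasets pyrfume_odors = calculate_db_indices_alt datasets pyrfume_odors := by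
  unfold calculate_db_indices calculate_db_indices_alt
  rw [loopA_eq pyrfume_odors datasets PySem.Dict.empty PySem.Dict.empty 0]

-- ===== VERDICT (by name: the statement is the Claim_ definition above) =====
theorem calculate_db_indices_spec : Claim_equal_calculate_db_indices := by
  intro ds po _ _
  unfold Spec_calculate_db_indices
  exact calc_eq ds po
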